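-- pv_equiv track=rewrite | github.com/cellnopt/cellnopt | cno/io/reactions.py | _rename_one_species
-- ===== SOURCE A (Python) =====
-- def _rename_one_species(lhs, k, v):
--     symbols = ['+', '^', '!', '=']
--     new_name = ''
--     current_species = ''
--
--     # LHS
--     for x in lhs:
--         # each time there is a symbol found, we will read a new species
--         if x in symbols:
--             # the current species should now be added to the new_name
--             if current_species == k:
--                 new_name += v
--             else:
--                 new_name += current_species
--             current_species = ''
--             new_name += x
--         else:
--             current_species += x
--     # RHS: in principle current_species should be the RHS
--     if current_species == k:
--         new_name += v
--     else:
--         new_name += current_species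
--     return new_name
-- ===== SOURCE B (Python) =====
-- def _rename_one_species(lhs, k, v):
--     symbols = '+^!='
--     out = []
--     i = 0
--     n = len(lhs)
--     while True:
--         j = i
--         while j < n and lhs[j] not in symbols:
--             j += 1
--         tok = lhs[i:j]
--         out.append(v if tok == k else tok)
--         if j == n:
--             break
--         out.append(lhs[j])
--         i = j + 1
--     return ''.join(out)
-- ===== Notes on version B (the rewrite author's own statement) =====
-- stated objective: alternative
-- what changed: Replaces the char-by-char accumulator with a tokenizer that scans to the next symbol, slices out each species token, substitutes it if it equals k, and joins the collected pieces.
import Mathlib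
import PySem

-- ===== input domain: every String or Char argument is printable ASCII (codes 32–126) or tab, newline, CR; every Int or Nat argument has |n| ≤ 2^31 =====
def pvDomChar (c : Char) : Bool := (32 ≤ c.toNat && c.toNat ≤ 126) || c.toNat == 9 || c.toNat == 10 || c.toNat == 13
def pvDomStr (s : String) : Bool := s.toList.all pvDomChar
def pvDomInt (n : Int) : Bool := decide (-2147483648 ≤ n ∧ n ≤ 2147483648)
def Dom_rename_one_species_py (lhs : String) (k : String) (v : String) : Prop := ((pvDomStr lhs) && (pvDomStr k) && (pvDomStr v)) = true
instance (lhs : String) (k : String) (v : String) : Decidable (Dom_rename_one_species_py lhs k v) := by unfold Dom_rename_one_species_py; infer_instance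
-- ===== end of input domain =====

-- B replaces A's char-by-char accumulator with a scan-to-next-symbol tokenizer (alternative decomposition, same cost).


-- shared by both ports: "x in symbols" / "x not in '+^!='" membership test
def pvIsSym (c : Char) : Bool := c == '+' || c == '^' || c == '!' || c == '='

-- ===== PORT A =====
-- 'if current_species == k: new_name += v else: new_name += current_species'
def renSubA (k v tok : List Char) : List Char := if tok = k then v else tok

-- one iteration of A's 'for x in lhs' loop; state = (new_name, current_species)
def renStepA (k v : List Char) (st : List Char × List Char) (x : Char) : List Char × List Char :=
  if pvIsSym x then (st.1 ++ renSubA k v st.2 ++ [x], []) else (st.1, st.2 ++ [x])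

def rename_one_species_py (lhs : String) (k : String) (v : String) : String :=
  let st := lhs.toList.foldl (renStepA k.toList v.toList) ([], [])
  String.mk (st.1 ++ renSubA k.toList v.toList st.2)

-- ===== PORT B =====
-- B's substitution of a whole token: 'v if tok == k else tok'
def renSubB (k v tok : List Char) : List Char := if tok = k then v else tok

-- B's outer while loop: scan to the next symbol (inner while ≙ takeWhile/dropWhile),
-- emit the substituted token, then the symbol, and continue after it.
def renSplitB (k v : List Char) (cs : List Char) : List Char :=
  let tok := cs.takeWhile (fun c => !pvIsSym c)
  match h : cs.dropWhile (fun c => !pvIsSym c) with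
  | [] => renSubB k v tok
  | d :: rest => renSubB k v tok ++ d :: renSplitB k v rest
termination_by cs.length
decreasing_by
  have := List.length_dropWhile_le (p := fun c => !pvIsSym c) (l := cs)
  rw [h] at this; simp at this; omega

def rename_one_species_py_alt (lhs : String) (k : String) (v : String) : String :=
  String.mk (renSplitB k.toList v.toList lhs.toList)

-- ===== PRECONDITION & SPEC =====
def Spec_rename_one_species_py (lhs : String) (k : String) (v : String) (out : String) : Prop := out = rename_one_species_py_alt lhs k v
instance (lhs : String) (k : String) (v : String) (out : String) : Decidable (Spec_rename_one_species_py lhs k v out) := by unfold Spec_rename_one_species_py; infer_instance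

-- ===== CLAIM (what is proved, stated in full; the proofs are below) =====
def Claim_equal_rename_one_species_py : Prop := ∀ (lhs : String) (k : String) (v : String), Dom_rename_one_species_py lhs k v → Spec_rename_one_species_py lhs k v (rename_one_species_py lhs k v)

-- ===== LEMMAS AND PROOFS =====

theorem takeWhile_all {cur : List Char} (h : ∀ c ∈ cur, pvIsSym c = false) :
    cur.takeWhile (fun c => !pvIsSym c) = cur := by
  induction cur with
  | nil => rfl
  | cons a t ih =>
    have ha : pvIsSym a = false := h a (by simp)
    have ht : ∀ c ∈ t, pvIsSym c = false := fun c hc => h c (by simp [hc])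
    simp [List.takeWhile_cons, ha, ih ht]

theorem dropWhile_all {cur : List Char} (h : ∀ c ∈ cur, pvIsSym c = false) :
    cur.dropWhile (fun c => !pvIsSym c) = [] := by
  induction cur with
  | nil => rfl
  | cons a t ih =>
    have ha : pvIsSym a = false := h a (by simp)
    have ht : ∀ c ∈ t, pvIsSym c = false := fun c hc => h c (by simp [hc])
    simp [List.dropWhile_cons, ha, ih ht]

theorem takeWhile_all_sym {cur : List Char} {x : Char} {cs : List Char}
    (h : ∀ c ∈ cur, pvIsSym c = false) (hx : pvIsSym x = true) :
    (cur ++ x :: cs).takeWhile (fun c => !pvIsSym c) = cur := by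
  induction cur with
  | nil => simp [List.takeWhile_cons, hx]
  | cons a t ih =>
    have ha : pvIsSym a = false := h a (by simp)
    have ht : ∀ c ∈ t, pvIsSym c = false := fun c hc => h c (by simp [hc])
    simp [List.takeWhile_cons, ha, ih ht]

theorem dropWhile_all_sym {cur : List Char} {x : Char} {cs : List Char}
    (h : ∀ c ∈ cur, pvIsSym c = false) (hx : pvIsSym x = true) :
    (cur ++ x :: cs).dropWhile (fun c => !pvIsSym c) = x :: cs := by
  induction cur with
  | nil => simp [List.dropWhile_cons, hx]
  | cons a t ih =>
    have ha : pvIsSym a = false := h a (by simp)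
    have ht : ∀ c ∈ t, pvIsSym c = false := fun c hc => h c (by simp [hc])
    simp [List.dropWhile_cons, ha, ih ht]

theorem fold_eq_split (k v : List Char) :
    ∀ (cs cur nn : List Char), (∀ c ∈ cur, pvIsSym c = false) →
    (let st := cs.foldl (renStepA k v) (nn, cur)
     st.1 ++ renSubA k v st.2) = nn ++ renSplitB k v (cur ++ cs) := by
  intro cs
  induction cs with
  | nil =>
    intro cur nn h
    rw [renSplitB.eq_def]
    simp only [List.append_nil, List.foldl_nil, takeWhile_all h]
    split
    · rfl
    · next d rest hd =>
        rw [List.append_nil, dropWhile_all h] at hd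
        exact absurd hd (by simp)
  | cons x cs ih =>
    intro cur nn h
    by_cases hx : pvIsSym x = true
    · rw [renSplitB.eq_def, takeWhile_all_sym h hx]
      have hsplit := dropWhile_all_sym h hx (cs := cs)
      split
      · next hd =>
          rw [hsplit] at hd
          exact absurd hd (by simp)
      next d rest hd =>
      rw [hsplit] at hd
      injection hd with h1 h2
      subst h1; subst h2
      have heq := ih [] (nn ++ renSubA k v cur ++ [x]) (by simp)
      simp only [List.nil_append] at heq
      simp only [List.foldl_cons, renStepA, hx, if_true]
      rw [heq]
      simp [renSubB, renSubA, List.append_assoc]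
    · have hx' : pvIsSym x = false := by simpa using hx
      have := ih (cur ++ [x]) nn (by
        intro c hc
        rcases List.mem_append.mp hc with h1 | h1
        · exact h c h1
        · simp at h1; simpa [h1] using hx')
      simp only [List.foldl_cons, renStepA, hx', if_false, Bool.false_eq_true] at this ⊢
      rw [this]
      simp

-- ===== VERDICT (by name: the statement is the Claim_ definition above) =====
theorem rename_one_species_py_spec : Claim_equal_rename_one_species_py := by
  intro lhs k v _
  unfold Spec_rename_one_species_py rename_one_species_py rename_one_species_py_alt
  have := fold_eq_split k.toList v.toList lhs.toList [] [] (by simp)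
  simp only [List.nil_append] at this
  exact congrArg String.mk this
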